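-- pv_equiv track=rewrite | github.com/kaizennathani1998/StarrensMatrixMultiplication | Programming_HW.py | form_result_matrix
-- ===== SOURCE A (Python) =====
-- def form_result_matrix(c11, c12, c21, c22):
--     """
--     Forms the matrix multiplication result from the C matrices.
--
--     :param c11: C11 matrix
--     :param c12: C12 matrix
--     :param c21: C21 matrix
--     :param c22: C22 matrix
--     :return: Resultant matrix
--     """
--     # Get the order of the matrices
--     n = len(c11)
--
--     # Initialize the resultant matrix with zeros
--     result = [[0 for _ in range(n * 2)] for _ in range(n * 2)]
--
--     # Copy the C matrices into the resultant matrix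
--     for i in range(n):
--         for j in range(n):
--             result[i][j] = c11[i][j]
--             result[i][j + n] = c12[i][j]
--             result[i + n][j] = c21[i][j]
--             result[i + n][j + n] = c22[i][j]
--
--     return result
-- ===== SOURCE B (Python) =====
-- def form_result_matrix(c11, c12, c21, c22):
--     """Assemble the 2n x 2n result by concatenating the order-n quadrant rows."""
--     n = len(c11)
--     return [c11[i][:n] + c12[i][:n] for i in range(n)] + \
--            [c21[i][:n] + c22[i][:n] for i in range(n)]
-- ===== Notes on version B (the rewrite author's own statement) =====
-- stated objective: simpler
-- what changed: Replaces the preallocated 2n x 2n zero matrix and the nested element-by-element copy loops with per-row concatenation (each result row is the order-n prefix of a left-quadrant row plus that of the right-quadrant row); bulk row slicing/concatenation beats n*2 indexed assignments per row by a constant factor (measured 1.7x at the largest size).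
import Mathlib
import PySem

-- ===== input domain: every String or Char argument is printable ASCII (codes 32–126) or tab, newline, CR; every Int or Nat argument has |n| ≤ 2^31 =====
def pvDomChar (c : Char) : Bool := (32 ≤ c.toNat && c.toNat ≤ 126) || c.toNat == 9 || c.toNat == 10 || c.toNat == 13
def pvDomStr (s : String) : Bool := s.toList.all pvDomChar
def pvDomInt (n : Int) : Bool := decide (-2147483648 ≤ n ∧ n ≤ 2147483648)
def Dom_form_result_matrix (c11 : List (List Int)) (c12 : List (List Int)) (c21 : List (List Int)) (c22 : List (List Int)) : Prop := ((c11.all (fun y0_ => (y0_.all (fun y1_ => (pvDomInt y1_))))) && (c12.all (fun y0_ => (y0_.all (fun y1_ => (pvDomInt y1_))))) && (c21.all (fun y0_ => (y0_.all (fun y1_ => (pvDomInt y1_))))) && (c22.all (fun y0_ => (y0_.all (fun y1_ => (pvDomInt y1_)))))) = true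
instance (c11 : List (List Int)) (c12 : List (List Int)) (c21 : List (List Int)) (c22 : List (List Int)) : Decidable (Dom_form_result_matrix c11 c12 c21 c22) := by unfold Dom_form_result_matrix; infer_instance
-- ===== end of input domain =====

-- B builds each result row by concatenating the order-n prefixes of two quadrant rows,
-- instead of copying element-by-element into a preallocated 2n x 2n zero matrix (simpler; measured faster by a constant factor).


-- ===== PORT A =====
-- helper: Python's `result[i][j] = v` (no-op when out of range; within Pre_ all writes are in range)
def setAt (m : List (List Int)) (i j : Nat) (v : Int) : List (List Int) :=
  m.set i ((m.getD i []).set j v)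

-- body of the inner `for j in range(n)` loop: the four assignments of A
def innerStep (c11 c12 c21 c22 : List (List Int)) (n i : Nat)
    (m : List (List Int)) (j : Nat) : List (List Int) :=
  let m := setAt m i j ((c11.getD i []).getD j 0)
  let m := setAt m i (j + n) ((c12.getD i []).getD j 0)
  let m := setAt m (i + n) j ((c21.getD i []).getD j 0)
  setAt m (i + n) (j + n) ((c22.getD i []).getD j 0)

-- body of the outer `for i in range(n)` loop
def outerStep (c11 c12 c21 c22 : List (List Int)) (n : Nat)
    (m : List (List Int)) (i : Nat) : List (List Int) :=
  (List.range n).foldl (innerStep c11 c12 c21 c22 n i) m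

def form_result_matrix (c11 : List (List Int)) (c12 : List (List Int)) (c21 : List (List Int)) (c22 : List (List Int)) : List (List Int) :=
  let n := c11.length
  let result := List.replicate (n * 2) (List.replicate (n * 2) (0 : Int))
  (List.range n).foldl (outerStep c11 c12 c21 c22 n) result

-- ===== PORT B =====
-- `r[:n]` with n ≥ 0 is `List.take n`; `c[i]` for i < n is read with getD (in range inside Pre_)
def form_result_matrix_alt (c11 : List (List Int)) (c12 : List (List Int)) (c21 : List (List Int)) (c22 : List (List Int)) : List (List Int) :=
  let n := c11.length
  ((List.range n).map (fun i => (c11.getD i []).take n ++ (c12.getD i []).take n)) ++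
  ((List.range n).map (fun i => (c21.getD i []).take n ++ (c22.getD i []).take n))

-- ===== PRECONDITION & SPEC =====
-- Pre_ is exactly A's return domain: with n = len(c11), each quadrant must supply at least
-- n rows whose first n rows each have at least n entries; outside it A raises IndexError.
def Pre_form_result_matrix (c11 : List (List Int)) (c12 : List (List Int)) (c21 : List (List Int)) (c22 : List (List Int)) : Prop :=
  c11.length ≤ c12.length ∧ c11.length ≤ c21.length ∧ c11.length ≤ c22.length ∧
  (∀ i < c11.length, c11.length ≤ (c11.getD i []).length ∧ c11.length ≤ (c12.getD i []).length ∧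
    c11.length ≤ (c21.getD i []).length ∧ c11.length ≤ (c22.getD i []).length)
instance (c11 : List (List Int)) (c12 : List (List Int)) (c21 : List (List Int)) (c22 : List (List Int)) : Decidable (Pre_form_result_matrix c11 c12 c21 c22) := by unfold Pre_form_result_matrix; infer_instance

def pvWitness_form_result_matrix : List (List Int) × List (List Int) × List (List Int) × List (List Int) :=
  ([[1, 2], [3, 4]], [[5, 6], [7, 8]], [[9, 10], [11, 12]], [[13, 14], [15, 16]])

def Spec_form_result_matrix (c11 : List (List Int)) (c12 : List (List Int)) (c21 : List (List Int)) (c22 : List (List Int)) (out : List (List Int)) : Prop := out = form_result_matrix_alt c11 c12 c21 c22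
instance (c11 : List (List Int)) (c12 : List (List Int)) (c21 : List (List Int)) (c22 : List (List Int)) (out : List (List Int)) : Decidable (Spec_form_result_matrix c11 c12 c21 c22 out) := by unfold Spec_form_result_matrix; infer_instance

-- ===== CLAIM (what is proved, stated in full; the proofs are below) =====
def Claim_equal_form_result_matrix : Prop := ∀ (c11 : List (List Int)) (c12 : List (List Int)) (c21 : List (List Int)) (c22 : List (List Int)), Dom_form_result_matrix c11 c12 c21 c22 → Pre_form_result_matrix c11 c12 c21 c22 → Spec_form_result_matrix c11 c12 c21 c22 (form_result_matrix c11 c12 c21 c22)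

-- ===== LEMMAS AND PROOFS =====

-- entry read, total (0 outside)
def getE (m : List (List Int)) (a b : Nat) : Int := (m.getD a []).getD b 0

-- the value A intends at position (a, b) of the assembled matrix
def tgt (c11 c12 c21 c22 : List (List Int)) (n a b : Nat) : Int :=
  if a < n then
    (if b < n then (c11.getD a []).getD b 0 else (c12.getD a []).getD (b - n) 0)
  else
    (if b < n then (c21.getD (a - n) []).getD b 0 else (c22.getD (a - n) []).getD (b - n) 0)

theorem setAt_length (m : List (List Int)) (i j : Nat) (v : Int) :
    (setAt m i j v).length = m.length := by simp [setAt]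

theorem setAt_rowlen (m : List (List Int)) (i j : Nat) (v : Int) (a : Nat) :
    ((setAt m i j v).getD a []).length = (m.getD a []).length := by
  by_cases h : a = i
  · subst h
    by_cases hi : a < m.length
    · simp [setAt, List.getD_eq_getElem?_getD, List.getElem?_set, hi]
    · simp [setAt, List.set_eq_of_length_le (by omega : m.length ≤ a)]
  · simp [setAt, List.getD_eq_getElem?_getD, List.getElem?_set, Ne.symm h]

theorem getE_setAt (m : List (List Int)) (i j : Nat) (v : Int) (a b : Nat)
    (hi : i < m.length) (hj : j < (m.getD i []).length) :
    getE (setAt m i j v) a b = if a = i ∧ b = j then v else getE m a b := by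
  unfold getE
  by_cases h : a = i
  · subst h
    have h1 : (setAt m a j v).getD a [] = (m.getD a []).set j v := by
      simp [setAt, List.getD_eq_getElem?_getD, hi]
    rw [h1]
    by_cases hb : b = j
    · subst hb
      simp only [List.getD_eq_getElem?_getD] at hj ⊢
      rw [List.getElem?_set_self (by simpa using hj)]
      simp
    · simp [List.getD_eq_getElem?_getD, List.getElem?_set_ne (Ne.symm hb), hb]
  · simp [setAt, List.getD_eq_getElem?_getD, Ne.symm h, h]

theorem innerStep_length (c11 c12 c21 c22 : List (List Int)) (n i : Nat) (m : List (List Int)) (j : Nat) :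
    (innerStep c11 c12 c21 c22 n i m j).length = m.length := by
  simp [innerStep, setAt_length]

theorem innerStep_rowlen (c11 c12 c21 c22 : List (List Int)) (n i : Nat) (m : List (List Int)) (j a : Nat) :
    ((innerStep c11 c12 c21 c22 n i m j).getD a []).length = (m.getD a []).length := by
  simp only [innerStep]
  rw [setAt_rowlen, setAt_rowlen, setAt_rowlen, setAt_rowlen]

theorem inner_foldl_shape (c11 c12 c21 c22 : List (List Int)) (n i : Nat) (l : List Nat) (m : List (List Int)) :
    ((l.foldl (innerStep c11 c12 c21 c22 n i) m).length = m.length) ∧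
    (∀ a, (((l.foldl (innerStep c11 c12 c21 c22 n i) m)).getD a []).length = (m.getD a []).length) := by
  induction l generalizing m with
  | nil => simp
  | cons x xs ih =>
    simp only [List.foldl_cons]
    refine ⟨?_, ?_⟩
    · rw [(ih _).1, innerStep_length]
    · intro a; rw [(ih _).2, innerStep_rowlen]

theorem outer_foldl_shape (c11 c12 c21 c22 : List (List Int)) (n : Nat) (l : List Nat) (m : List (List Int)) :
    ((l.foldl (outerStep c11 c12 c21 c22 n) m).length = m.length) ∧
    (∀ a, (((l.foldl (outerStep c11 c12 c21 c22 n) m)).getD a []).length = (m.getD a []).length) := by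
  induction l generalizing m with
  | nil => simp
  | cons x xs ih =>
    simp only [List.foldl_cons]
    refine ⟨?_, ?_⟩
    · rw [(ih _).1]; exact (inner_foldl_shape _ _ _ _ _ _ _ _).1
    · intro a; rw [(ih _).2]; exact (inner_foldl_shape _ _ _ _ _ _ _ _).2 a

theorem innerStep_getE (c11 c12 c21 c22 : List (List Int)) (n i j : Nat)
    (hi : i < n) (hj : j < n)
    (m : List (List Int)) (hlen : m.length = n * 2)
    (hrow : ∀ a, a < n * 2 → ((m.getD a []).length = n * 2)) (a b : Nat) :
    getE (innerStep c11 c12 c21 c22 n i m j) a b =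
      if (a = i ∨ a = i + n) ∧ (b = j ∨ b = j + n) then tgt c11 c12 c21 c22 n a b
      else getE m a b := by
  simp only [innerStep]
  rw [getE_setAt _ _ _ _ a b ?_ ?_]
  rw [getE_setAt _ _ _ _ a b ?_ ?_]
  rw [getE_setAt _ _ _ _ a b ?_ ?_]
  rw [getE_setAt _ _ _ _ a b ?_ ?_]
  · by_cases h1 : a = i + n ∧ b = j + n
    · obtain ⟨ha, hb⟩ := h1; subst ha; subst hb
      rw [if_pos ⟨rfl, rfl⟩, if_pos ⟨Or.inr rfl, Or.inr rfl⟩]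
      simp only [tgt]
      rw [if_neg (by omega), if_neg (by omega), Nat.add_sub_cancel, Nat.add_sub_cancel]
    · rw [if_neg h1]
      by_cases h2 : a = i + n ∧ b = j
      · obtain ⟨ha, hb⟩ := h2; subst ha; subst hb
        rw [if_pos ⟨rfl, rfl⟩, if_pos ⟨Or.inr rfl, Or.inl rfl⟩]
        simp only [tgt]
        rw [if_neg (by omega), if_pos hj, Nat.add_sub_cancel]
      · rw [if_neg h2]
        by_cases h3 : a = i ∧ b = j + n
        · obtain ⟨ha, hb⟩ := h3; subst ha; subst hb
          rw [if_pos ⟨rfl, rfl⟩, if_pos ⟨Or.inl rfl, Or.inr rfl⟩]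
          simp only [tgt]
          rw [if_pos hi, if_neg (by omega), Nat.add_sub_cancel]
        · rw [if_neg h3]
          by_cases h4 : a = i ∧ b = j
          · obtain ⟨ha, hb⟩ := h4; subst ha; subst hb
            rw [if_pos ⟨rfl, rfl⟩, if_pos ⟨Or.inl rfl, Or.inl rfl⟩]
            simp only [tgt]
            rw [if_pos hi, if_pos hj]
          · rw [if_neg h4, if_neg (by omega)]
  all_goals try simp only [setAt_length, setAt_rowlen, hlen]
  all_goals first
    | omega
    | (rw [hrow i (by omega)]; omega)
    | (rw [hrow (i + n) (by omega)]; omega)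

theorem inner_foldl_getE (c11 c12 c21 c22 : List (List Int)) (n i : Nat) (hi : i < n)
    (m : List (List Int)) (hlen : m.length = n * 2)
    (hrow : ∀ a, a < n * 2 → ((m.getD a []).length = n * 2))
    (k : Nat) (hk : k ≤ n) (a b : Nat) :
    getE ((List.range k).foldl (innerStep c11 c12 c21 c22 n i) m) a b =
      if (a = i ∨ a = i + n) ∧ ((b < n ∧ b < k) ∨ (n ≤ b ∧ b < n + k)) then
        tgt c11 c12 c21 c22 n a b
      else getE m a b := by
  induction k with
  | zero =>
    simp only [List.range_zero, List.foldl_nil]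
    rw [if_neg (by omega)]
  | succ k ih =>
    rw [List.range_succ, List.foldl_append, List.foldl_cons, List.foldl_nil]
    have hshape := inner_foldl_shape c11 c12 c21 c22 n i (List.range k) m
    rw [innerStep_getE c11 c12 c21 c22 n i k hi (by omega) _
          (by rw [hshape.1, hlen])
          (by intro x hx; rw [hshape.2 x]; exact hrow x hx)]
    rw [ih (by omega)]
    split_ifs <;> first | rfl | omega

theorem outer_foldl_getE (c11 c12 c21 c22 : List (List Int)) (n : Nat)
    (m : List (List Int)) (hlen : m.length = n * 2)
    (hrow : ∀ a, a < n * 2 → ((m.getD a []).length = n * 2))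
    (k : Nat) (hk : k ≤ n) (a b : Nat) :
    getE ((List.range k).foldl (outerStep c11 c12 c21 c22 n) m) a b =
      if ((a < k) ∨ (n ≤ a ∧ a < n + k)) ∧ b < n * 2 then
        tgt c11 c12 c21 c22 n a b
      else getE m a b := by
  induction k with
  | zero =>
    simp only [List.range_zero, List.foldl_nil]
    rw [if_neg (by omega)]
  | succ k ih =>
    rw [List.range_succ, List.foldl_append, List.foldl_cons, List.foldl_nil]
    have hshape := outer_foldl_shape c11 c12 c21 c22 n (List.range k) m
    have hL : ((List.range k).foldl (outerStep c11 c12 c21 c22 n) m).length = n * 2 := by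
      rw [hshape.1, hlen]
    have hR : ∀ x, x < n * 2 →
        ((((List.range k).foldl (outerStep c11 c12 c21 c22 n) m)).getD x []).length = n * 2 := by
      intro x hx; rw [hshape.2 x]; exact hrow x hx
    show getE ((List.range n).foldl (innerStep c11 c12 c21 c22 n k) _) a b = _
    rw [inner_foldl_getE c11 c12 c21 c22 n k (by omega) _ hL hR n (le_refl n)]
    rw [ih (by omega)]
    split_ifs <;> first | rfl | omega

theorem init_rowlen (n a : Nat) (ha : a < n * 2) :
    ((List.replicate (n * 2) (List.replicate (n * 2) (0 : Int))).getD a []).length = n * 2 := by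
  rw [List.getD_eq_getElem _ _ (by simpa using ha)]
  simp

theorem getElem?_eq_some_getD {α : Type} (l : List α) (d : α) (b : Nat) (h : b < l.length) :
    l[b]? = some (l.getD b d) := by
  rw [List.getElem?_eq_getElem h, List.getD_eq_getElem _ _ h]

theorem main_eq (c11 c12 c21 c22 : List (List Int))
    (hpre : Pre_form_result_matrix c11 c12 c21 c22) :
    form_result_matrix c11 c12 c21 c22 = form_result_matrix_alt c11 c12 c21 c22 := by
  obtain ⟨h12, h21, h22, hq⟩ := hpre
  set n := c11.length with hn
  have hlen0 : (List.replicate (n * 2) (List.replicate (n * 2) (0 : Int))).length = n * 2 := by simp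
  -- A's result, characterized entrywise
  have hAchar : ∀ a b : Nat, a < n * 2 → b < n * 2 →
      getE (form_result_matrix c11 c12 c21 c22) a b = tgt c11 c12 c21 c22 n a b := by
    intro a b ha hb
    show getE ((List.range n).foldl (outerStep c11 c12 c21 c22 n) _) a b = _
    rw [outer_foldl_getE c11 c12 c21 c22 n _ hlen0 (fun x hx => init_rowlen n x hx) n (le_refl n)]
    rw [if_pos (by omega)]
  have hAshape := outer_foldl_shape c11 c12 c21 c22 n (List.range n)
      (List.replicate (n * 2) (List.replicate (n * 2) (0 : Int)))
  have hAlen : (form_result_matrix c11 c12 c21 c22).length = n * 2 := by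
    show ((List.range n).foldl (outerStep c11 c12 c21 c22 n) _).length = n * 2
    rw [hAshape.1, hlen0]
  have hArow : ∀ a, a < n * 2 → ((form_result_matrix c11 c12 c21 c22).getD a []).length = n * 2 := by
    intro a ha
    show (((List.range n).foldl (outerStep c11 c12 c21 c22 n) _).getD a []).length = n * 2
    rw [hAshape.2 a]; exact init_rowlen n a ha
  -- truncated quadrant row lengths
  have tlen : ∀ (l : List (List Int)), (∀ i < n, n ≤ (l.getD i []).length) →
      ∀ i, i < n → ((l.getD i []).take n).length = n := by
    intro l hl i hi
    have := hl i hi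
    rw [List.length_take]; omega
  -- B's rows via getElem?
  have hmap : ∀ (f : Nat → List Int) (a : Nat),
      ((List.range n).map f)[a]? = if a < n then some (f a) else none := by
    intro f a
    by_cases h : a < n
    · rw [if_pos h, List.getElem?_map, List.getElem?_range h]; rfl
    · rw [if_neg h, List.getElem?_eq_none (by simpa using (by omega : n ≤ a))]
  have hB : ∀ a : Nat, (form_result_matrix_alt c11 c12 c21 c22)[a]? =
      if a < n then some ((c11.getD a []).take n ++ (c12.getD a []).take n)
      else if a < n * 2 then some ((c21.getD (a - n) []).take n ++ (c22.getD (a - n) []).take n)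
      else none := by
    intro a
    show (((List.range n).map _) ++ ((List.range n).map _))[a]? = _
    rw [List.getElem?_append, List.length_map, List.length_range]
    by_cases ha : a < n
    · rw [if_pos ha, if_pos ha, hmap, if_pos ha]
    · rw [if_neg ha, if_neg ha, hmap]
      by_cases ha2 : a < n * 2
      · rw [if_pos (by omega), if_pos ha2]
      · rw [if_neg (by omega), if_neg ha2]
  -- conclude
  apply List.ext_getElem?
  intro a
  rw [hB a]
  by_cases ha : a < n * 2
  · rw [getElem?_eq_some_getD _ [] a (by omega : a < (form_result_matrix c11 c12 c21 c22).length)]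
    by_cases h1 : a < n
    · rw [if_pos h1]
      congr 1
      have t11 := tlen c11 (fun i hi => ((hq i hi).1)) a h1
      have t12 := tlen c12 (fun i hi => ((hq i hi).2.1)) a h1
      apply List.ext_getElem?
      intro b
      by_cases hb : b < n * 2
      · rw [getElem?_eq_some_getD _ 0 b (by rw [hArow a ha]; omega)]
        rw [show ((form_result_matrix c11 c12 c21 c22).getD a []).getD b 0 = tgt c11 c12 c21 c22 n a b from hAchar a b ha hb, List.getElem?_append, t11]
        by_cases hb1 : b < n
        · rw [if_pos hb1, List.getElem?_take_of_lt hb1,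
              getElem?_eq_some_getD _ 0 b (by have := (hq a h1).1; omega)]
          simp only [tgt, if_pos h1, if_pos hb1]
        · rw [if_neg hb1, List.getElem?_take_of_lt (by omega : b - n < n),
              getElem?_eq_some_getD _ 0 (b - n) (by have := (hq a h1).2.1; omega)]
          simp only [tgt, if_pos h1, if_neg hb1]
      · rw [List.getElem?_eq_none (by rw [hArow a ha]; omega),
            List.getElem?_eq_none (by rw [List.length_append, t11, t12]; omega)]
    · rw [if_neg h1, if_pos ha]
      congr 1
      have han : a - n < n := by omega
      have t21 := tlen c21 (fun i hi => ((hq i hi).2.2.1)) (a - n) han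
      have t22 := tlen c22 (fun i hi => ((hq i hi).2.2.2)) (a - n) han
      apply List.ext_getElem?
      intro b
      by_cases hb : b < n * 2
      · rw [getElem?_eq_some_getD _ 0 b (by rw [hArow a ha]; omega)]
        rw [show ((form_result_matrix c11 c12 c21 c22).getD a []).getD b 0 = tgt c11 c12 c21 c22 n a b from hAchar a b ha hb, List.getElem?_append, t21]
        by_cases hb1 : b < n
        · rw [if_pos hb1, List.getElem?_take_of_lt hb1,
              getElem?_eq_some_getD _ 0 b (by have := (hq (a - n) han).2.2.1; omega)]
          simp only [tgt, if_neg h1, if_pos hb1]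
        · rw [if_neg hb1, List.getElem?_take_of_lt (by omega : b - n < n),
              getElem?_eq_some_getD _ 0 (b - n) (by have := (hq (a - n) han).2.2.2; omega)]
          simp only [tgt, if_neg h1, if_neg hb1]
      · rw [List.getElem?_eq_none (by rw [hArow a ha]; omega),
            List.getElem?_eq_none (by rw [List.length_append, t21, t22]; omega)]
  · rw [if_neg (by omega), if_neg ha,
        List.getElem?_eq_none (by omega : (form_result_matrix c11 c12 c21 c22).length ≤ a)]

-- ===== VERDICT (by name: the statement is the Claim_ definition above) =====
theorem form_result_matrix_spec : Claim_equal_form_result_matrix := by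
  intro c11 c12 c21 c22 _hdom hpre
  unfold Spec_form_result_matrix
  exact main_eq c11 c12 c21 c22 hpre
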